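-- pv_equiv track=rewrite | github.com/73nko/daily-interview | Python/distribute-bonuses.py | get_bonuses
-- ===== SOURCE A (Python) =====
-- def get_bonuses(performance):
--     count = len(performance)
--     bonus = [1] * count
--
--     for i in range(1, count):
--         if performance[i - 1] < performance[i]:
--             bonus[i] = bonus[i - 1] + 1
--
--     for i in range(count - 2, -1, -1):
--         if performance[i + 1] < performance[i]:
--             bonus[i] = max(bonus[i], bonus[i + 1] + 1)
--
--     return bonus
-- ===== SOURCE B (Python) =====
-- def get_bonuses(performance):
--     n = len(performance)
--     result = []
--     for i in range(n):
--         up = 1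
--         j = i
--         while j > 0 and performance[j - 1] < performance[j]:
--             up += 1
--             j -= 1
--         down = 1
--         j = i
--         while j < n - 1 and performance[j + 1] < performance[j]:
--             down += 1
--             j += 1
--         result.append(max(up, down))
--     return result
-- ===== Notes on version B (the rewrite author's own statement) =====
-- stated objective: alternative
-- what changed: Replaces A's two in-place dynamic-programming passes over a shared bonus array by an independent per-index computation: for each position B walks left while the values strictly increase and right while they strictly decrease, and returns the max of the two local run lengths; no intermediate array is carried between positions.
import Mathlib
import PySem

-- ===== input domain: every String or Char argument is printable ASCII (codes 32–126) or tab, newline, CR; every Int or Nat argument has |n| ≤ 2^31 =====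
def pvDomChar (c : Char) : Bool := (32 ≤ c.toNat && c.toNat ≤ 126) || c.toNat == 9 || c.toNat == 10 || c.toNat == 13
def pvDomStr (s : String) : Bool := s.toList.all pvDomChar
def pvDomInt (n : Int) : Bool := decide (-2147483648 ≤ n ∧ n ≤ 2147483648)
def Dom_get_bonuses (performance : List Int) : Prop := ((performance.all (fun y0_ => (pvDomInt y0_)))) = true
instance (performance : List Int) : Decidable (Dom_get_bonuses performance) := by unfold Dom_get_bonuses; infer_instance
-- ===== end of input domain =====

-- B replaces A's two in-place DP passes by an independent per-index computation
-- (walk left while strictly increasing, right while strictly decreasing, take the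
-- max of the two run lengths); alternative decomposition, not claimed faster.

-- ===== PORT A =====
-- body of A's first loop: 'if performance[i-1] < performance[i]: bonus[i] = bonus[i-1] + 1'
-- (indices i are drawn from range(1, count) resp. range(count-2, -1, -1), hence ≥ 0 and in
-- range, so the total pyGetD/pySetD forms are exact here)
def pvStep1 (performance b : List Int) (i : Int) : List Int :=
  if PySem.List.pyGetD performance (i - 1) 0 < PySem.List.pyGetD performance i 0 then
    PySem.List.pySetD b i (PySem.List.pyGetD b (i - 1) 0 + 1)
  else b

-- body of A's second loop: 'if performance[i+1] < performance[i]: bonus[i] = max(bonus[i], bonus[i+1] + 1)'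
def pvStep2 (performance b : List Int) (i : Int) : List Int :=
  if PySem.List.pyGetD performance (i + 1) 0 < PySem.List.pyGetD performance i 0 then
    PySem.List.pySetD b i (max (PySem.List.pyGetD b i 0) (PySem.List.pyGetD b (i + 1) 0 + 1))
  else b

def get_bonuses (performance : List Int) : List Int :=
  let count : Int := performance.length
  let bonus : List Int := List.replicate performance.length (1 : Int)
  let bonus := (PySem.List.pyRange 1 count 1).foldl (pvStep1 performance) bonus
  let bonus := (PySem.List.pyRange (count - 2) (-1) (-1)).foldl (pvStep2 performance) bonus
  bonus

-- ===== PORT B =====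
-- B's first while loop: 'while j > 0 and performance[j-1] < performance[j]: up += 1; j -= 1'
-- carrying the accumulator u (indices j, j-1 are in range, so getD is exact here)
def countUpFrom (perf : List Int) (u : Int) : Nat → Int
  | 0 => u
  | j + 1 => if perf.getD j 0 < perf.getD (j + 1) 0 then countUpFrom perf (u + 1) j else u

-- B's second while loop: 'while j < n-1 and performance[j+1] < performance[j]: down += 1; j += 1'
def countDownFrom (perf : List Int) (d : Int) (j : Nat) : Int :=
  if h : j + 1 < perf.length ∧ perf.getD (j + 1) 0 < perf.getD j 0 then
    countDownFrom perf (d + 1) (j + 1)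
  else d
termination_by perf.length - j
decreasing_by omega

def get_bonuses_alt (performance : List Int) : List Int :=
  (List.range performance.length).map
    (fun i => max (countUpFrom performance 1 i) (countDownFrom performance 1 i))

-- ===== PRECONDITION & SPEC =====
def Spec_get_bonuses (performance : List Int) (out : List Int) : Prop := out = get_bonuses_alt performance
instance (performance : List Int) (out : List Int) : Decidable (Spec_get_bonuses performance out) := by unfold Spec_get_bonuses; infer_instance

-- ===== CLAIM (what is proved, stated in full; the proofs are below) =====
def Claim_equal_get_bonuses : Prop := ∀ (performance : List Int), Dom_get_bonuses performance → Spec_get_bonuses performance (get_bonuses performance)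

-- ===== LEMMAS AND PROOFS =====

-- characterisation of A: the forward pass builds the strict-increasing run lengths
-- ('runs'), the backward pass max-merges the strict-decreasing ones ('pvDwn').
def pvVal (st : Option (Int × Int)) (p : Int) : Int :=
  match st with
  | some (q, b) => if q < p then b + 1 else 1
  | none => 1

def pvRunsAux (st : Option (Int × Int)) : List Int → List Int
  | [] => []
  | p :: rest => pvVal st p :: pvRunsAux (some (p, pvVal st p)) rest

def pvRuns (seq : List Int) : List Int := pvRunsAux none seq

-- invariant of the carried state: the recorded last value is ≥ 1
def pvStOK (st : Option (Int × Int)) : Prop := ∀ q b, st = some (q, b) → 1 ≤ b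

-- the strict-decreasing run lengths, suffix-recursively
def pvDwn : List Int → List Int
  | [] => []
  | [_] => [1]
  | p :: q :: rest => (if q < p then (pvDwn (q :: rest)).headD 1 + 1 else 1) :: pvDwn (q :: rest)

lemma pvVal_ge_one (st : Option (Int × Int)) (p : Int) (h : pvStOK st) : 1 ≤ pvVal st p := by
  match st with
  | none => simp [pvVal]
  | some (q, b) =>
    have := h q b rfl
    simp only [pvVal]
    split <;> omega

lemma pvStOK_next (st : Option (Int × Int)) (p : Int) (h : pvStOK st) :
    pvStOK (some (p, pvVal st p)) := by
  intro q b hb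
  cases hb
  exact pvVal_ge_one st p h

lemma pvDwn_cons (q : Int) (rest : List Int) :
    ∃ dh t, pvDwn (q :: rest) = dh :: t ∧ 1 ≤ dh := by
  induction rest generalizing q with
  | nil => exact ⟨1, [], rfl, le_refl 1⟩
  | cons r rs ih =>
    obtain ⟨dh', t', hEq, hge⟩ := ih r
    refine ⟨if r < q then (pvDwn (r :: rs)).headD 1 + 1 else 1, pvDwn (r :: rs), rfl, ?_⟩
    rw [hEq]
    simp only [List.headD_cons]
    split <;> omega

-- index-shift for pyGetD / pySetD on a cons cell (exact: index ≥ 0)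
lemma pvGet_shift (x : Int) (xs : List Int) (i : Int) (h : 0 ≤ i) (d : Int) :
    PySem.List.pyGetD (x :: xs) (i + 1) d = PySem.List.pyGetD xs i d := by
  obtain ⟨k, rfl⟩ := Int.eq_ofNat_of_zero_le h
  rw [show ((k : Int) + 1) = ((k + 1 : Nat) : Int) by push_cast; ring]
  rw [PySem.List.pyGetD_natCast, PySem.List.pyGetD_natCast]
  simp [List.getD]

lemma pvSet_shift (x : Int) (xs : List Int) (i : Int) (h : 0 ≤ i) (v : Int) :
    PySem.List.pySetD (x :: xs) (i + 1) v = x :: PySem.List.pySetD xs i v := by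
  obtain ⟨k, rfl⟩ := Int.eq_ofNat_of_zero_le h
  rw [show ((k : Int) + 1) = ((k + 1 : Nat) : Int) by push_cast; ring]
  rw [PySem.List.pySetD_natCast, PySem.List.pySetD_natCast]
  simp [List.set]

-- the loop steps commute with the head cell for shifted indices
lemma pvStep1_shift (p0 : Int) (perf : List Int) (u : Int) (b : List Int) (i : Int) (h : 1 ≤ i) :
    pvStep1 (p0 :: perf) (u :: b) (i + 1) = u :: pvStep1 perf b i := by
  unfold pvStep1
  rw [show i + 1 - 1 = (i - 1) + 1 by ring]
  rw [pvGet_shift p0 perf (i - 1) (by omega), pvGet_shift p0 perf i (by omega),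
      pvGet_shift u b (i - 1) (by omega)]
  split
  · rw [pvSet_shift u b i (by omega)]
  · rfl

lemma pvStep2_shift (p0 : Int) (perf : List Int) (u : Int) (b : List Int) (i : Int) (h : 0 ≤ i) :
    pvStep2 (p0 :: perf) (u :: b) (i + 1) = u :: pvStep2 perf b i := by
  unfold pvStep2
  rw [show i + 1 + 1 = (i + 1) + 1 by ring]
  rw [pvGet_shift p0 perf (i + 1) (by omega), pvGet_shift p0 perf i (by omega),
      pvGet_shift u b i (by omega), pvGet_shift u b (i + 1) (by omega)]
  split
  · rw [pvSet_shift u b i (by omega)]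
  · rfl

-- the loop steps at the boundary index, evaluated on exposed cons cells
lemma pvStep1_one (p q : Int) (perf : List Int) (u w : Int) (b : List Int) :
    pvStep1 (p :: q :: perf) (u :: w :: b) 1 = u :: (if p < q then u + 1 else w) :: b := by
  unfold pvStep1
  rw [show (1 : Int) - 1 = ((0 : Nat) : Int) from rfl]
  rw [show (1 : Int) = ((1 : Nat) : Int) from rfl]
  simp only [PySem.List.pyGetD_natCast, PySem.List.pySetD_natCast]
  simp only [List.getD_cons_zero, List.getD_cons_succ, List.set]
  split <;> simp

lemma pvStep2_zero (p r : Int) (perf : List Int) (u w : Int) (b : List Int) :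
    pvStep2 (p :: r :: perf) (u :: w :: b) 0 = (if r < p then max u (w + 1) else u) :: w :: b := by
  unfold pvStep2
  rw [show (0 : Int) + 1 = ((1 : Nat) : Int) by norm_num]
  rw [show (0 : Int) = ((0 : Nat) : Int) from rfl]
  simp only [PySem.List.pyGetD_natCast, PySem.List.pySetD_natCast]
  simp only [List.getD_cons_zero, List.getD_cons_succ, List.set]
  split <;> rfl

-- folding a pass over a shifted index list peels the head cell
lemma pvFold1_shift (L : List Int) : ∀ (p0 : Int) (perf : List Int) (u : Int) (b : List Int),
    (∀ i ∈ L, 1 ≤ i) →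
    (L.map (· + 1)).foldl (pvStep1 (p0 :: perf)) (u :: b) = u :: L.foldl (pvStep1 perf) b := by
  induction L with
  | nil => intro _ _ _ _ _; rfl
  | cons i L ih =>
    intro p0 perf u b hL
    simp only [List.map_cons, List.foldl_cons]
    rw [pvStep1_shift p0 perf u b i (hL i (by simp))]
    exact ih p0 perf u _ (fun j hj => hL j (by simp [hj]))

lemma pvFold2_shift (L : List Int) : ∀ (p0 : Int) (perf : List Int) (u : Int) (b : List Int),
    (∀ i ∈ L, 0 ≤ i) →
    (L.map (· + 1)).foldl (pvStep2 (p0 :: perf)) (u :: b) = u :: L.foldl (pvStep2 perf) b := by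
  induction L with
  | nil => intro _ _ _ _ _; rfl
  | cons i L ih =>
    intro p0 perf u b hL
    simp only [List.map_cons, List.foldl_cons]
    rw [pvStep2_shift p0 perf u b i (hL i (by simp))]
    exact ih p0 perf u _ (fun j hj => hL j (by simp [hj]))

-- PASS 1 core: A's forward loop computes exactly the strict-increasing run lengths
lemma pvPass1_core (rest : List Int) : ∀ (pprev u : Int),
    (PySem.List.pyRange 1 ((rest.length : Int) + 1) 1).foldl (pvStep1 (pprev :: rest))
        (u :: List.replicate rest.length 1)
    = u :: pvRunsAux (some (pprev, u)) rest := by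
  induction rest with
  | nil =>
    intro pprev u
    rw [PySem.List.pyRange_one_eq_nil (by simp)]
    rfl
  | cons q rest' ih =>
    intro pprev u
    have hlen : ((q :: rest').length : Int) + 1 = (rest'.length : Int) + 2 := by
      push_cast [List.length_cons]; ring
    rw [hlen]
    rw [PySem.List.pyRange_one_cons (by omega)]
    have hshift : PySem.List.pyRange (1 + 1) ((rest'.length : Int) + 2) 1
        = (PySem.List.pyRange 1 ((rest'.length : Int) + 1) 1).map (· + 1) := by
      rw [PySem.List.pyRange_one, PySem.List.pyRange_one]
      rw [show ((rest'.length : Int) + 2 - (1 + 1)) = ((rest'.length : Int) + 1 - 1) by ring]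
      rw [List.map_map]
      apply List.map_congr_left
      intro k _
      simp only [Function.comp_apply]
      ring
    simp only [List.foldl_cons]
    rw [show List.replicate (q :: rest').length (1 : Int) = 1 :: List.replicate rest'.length 1 from rfl]
    rw [pvStep1_one pprev q rest' u 1 (List.replicate rest'.length 1)]
    rw [hshift]
    rw [pvFold1_shift _ pprev (q :: rest') u _
      (fun i hi => ((PySem.List.mem_pyRange_one).1 hi).1)]
    rw [show (if pprev < q then u + 1 else 1) = pvVal (some (pprev, u)) q from rfl]
    rw [ih q (pvVal (some (pprev, u)) q)]
    rfl

lemma pvPass1_eq_runs (perf : List Int) :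
    (PySem.List.pyRange 1 (perf.length : Int) 1).foldl (pvStep1 perf)
        (List.replicate perf.length (1 : Int))
    = pvRuns perf := by
  match perf with
  | [] => rfl
  | p :: rest =>
    have h : ((p :: rest).length : Int) = (rest.length : Int) + 1 := by
      push_cast [List.length_cons]; ring
    rw [h]
    rw [show List.replicate (p :: rest).length (1 : Int) = 1 :: List.replicate rest.length 1 from rfl]
    rw [pvPass1_core rest p 1]
    rfl

-- PASS 2 core: A's backward max-merge on any 'runs' array yields the zipWith-max of it with pvDwn
lemma pvPass2_core (perf : List Int) : ∀ (st : Option (Int × Int)), pvStOK st →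
    (PySem.List.pyRange ((perf.length : Int) - 2) (-1) (-1)).foldl (pvStep2 perf)
        (pvRunsAux st perf)
    = List.zipWith max (pvRunsAux st perf) (pvDwn perf) := by
  induction perf with
  | nil => intro st _; rfl
  | cons p rest ih =>
    intro st hst
    match rest with
    | [] =>
      rw [PySem.List.pyRange_neg_one_eq_nil (by simp)]
      simp only [List.foldl_nil]
      show pvRunsAux st [p] = List.zipWith max (pvRunsAux st [p]) [1]
      simp [pvRunsAux, max_eq_left (pvVal_ge_one st p hst)]
    | q :: rest' =>
      have h1vp : 1 ≤ pvVal st p := pvVal_ge_one st p hst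
      have hstOK' : pvStOK (some (p, pvVal st p)) := pvStOK_next st p hst
      have hrange : PySem.List.pyRange (((p :: q :: rest').length : Int) - 2) (-1) (-1)
          = ((PySem.List.pyRange (((q :: rest').length : Int) - 2) (-1) (-1)).map (· + 1)) ++ [0] := by
        rw [show (((p :: q :: rest').length : Int) - 2) = (rest'.length : Int) by
          push_cast [List.length_cons]; ring]
        rw [show (((q :: rest').length : Int) - 2) = (rest'.length : Int) - 1 by
          push_cast [List.length_cons]; ring]
        rw [PySem.List.pyRange_neg_one, PySem.List.pyRange_neg_one]
        rw [show ((rest'.length : Int) - (-1)).toNat = rest'.length + 1 by omega]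
        rw [show ((rest'.length : Int) - 1 - (-1)).toNat = rest'.length by omega]
        rw [List.range_succ, List.map_append, List.map_map]
        congr 1
        · apply List.map_congr_left
          intro k hk
          have := List.mem_range.1 hk
          simp only [Function.comp_apply]
          omega
        · simp
      rw [hrange, List.foldl_append]
      rw [show pvRunsAux st (p :: q :: rest')
            = pvVal st p :: pvRunsAux (some (p, pvVal st p)) (q :: rest') from rfl]
      rw [pvFold2_shift _ p (q :: rest') (pvVal st p) _
        (fun i hi => by
          have := (PySem.List.mem_pyRange_neg_one.1 hi).1
          omega)]
      rw [ih (some (p, pvVal st p)) hstOK']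
      obtain ⟨dh, t, hD, hdh⟩ := pvDwn_cons q rest'
      have hRcons : List.zipWith max (pvRunsAux (some (p, pvVal st p)) (q :: rest')) (pvDwn (q :: rest'))
          = max (pvVal (some (p, pvVal st p)) q) dh
            :: List.zipWith max
                (pvRunsAux (some (q, pvVal (some (p, pvVal st p)) q)) rest') t := by
        rw [show pvRunsAux (some (p, pvVal st p)) (q :: rest')
              = pvVal (some (p, pvVal st p)) q
                :: pvRunsAux (some (q, pvVal (some (p, pvVal st p)) q)) rest' from rfl, hD]
        rfl
      rw [hRcons]
      simp only [List.foldl_cons, List.foldl_nil]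
      rw [pvStep2_zero p q rest' (pvVal st p) (max (pvVal (some (p, pvVal st p)) q) dh) _]
      rw [show pvDwn (p :: q :: rest')
            = (if q < p then (pvDwn (q :: rest')).headD 1 + 1 else 1) :: pvDwn (q :: rest') from rfl]
      rw [hD]
      simp only [List.headD_cons]
      rw [show pvRunsAux (some (p, pvVal st p)) (q :: rest')
            = pvVal (some (p, pvVal st p)) q
              :: pvRunsAux (some (q, pvVal (some (p, pvVal st p)) q)) rest' from rfl]
      simp only [List.zipWith_cons_cons]
      by_cases hqp : q < p
      · have hvq : pvVal (some (p, pvVal st p)) q = 1 := by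
          simp [pvVal, show ¬ p < q by omega]
        rw [hvq]
        simp [hqp, max_eq_right hdh]
      · simp [hqp, max_eq_left h1vp]

-- ===== bridging B's local scans to the run-length arrays =====

lemma pvRunsAux_length (perf : List Int) : ∀ st, (pvRunsAux st perf).length = perf.length := by
  induction perf with
  | nil => intro st; rfl
  | cons p rest ih => intro st; simp [pvRunsAux, ih]

lemma pvDwn_length (perf : List Int) : (pvDwn perf).length = perf.length := by
  induction perf with
  | nil => rfl
  | cons p rest ih =>
    match rest, ih with
    | [], _ => rfl
    | q :: rest', ih => simp [pvDwn]; simpa [pvDwn] using ih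

-- accumulator lemmas
lemma pvCU_acc (perf : List Int) : ∀ (j : Nat) (u : Int),
    countUpFrom perf u j = u - 1 + countUpFrom perf 1 j := by
  intro j
  induction j with
  | zero => intro u; simp [countUpFrom]
  | succ j ih =>
    intro u
    simp only [countUpFrom]
    split
    · rw [ih (u + 1), ih (1 + 1)]; ring
    · ring

lemma pvCD_acc (perf : List Int) : ∀ (j : Nat) (d : Int),
    countDownFrom perf d j = d - 1 + countDownFrom perf 1 j := by
  intro j
  induction hn : perf.length - j using Nat.strong_induction_on generalizing j with
  | _ n ih =>
    intro d
    by_cases hc : j + 1 < perf.length ∧ perf.getD (j + 1) 0 < perf.getD j 0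
    · have hlt : perf.length - (j + 1) < n := by omega
      conv_lhs => rw [countDownFrom]
      conv_rhs => rw [countDownFrom]
      rw [dif_pos hc, dif_pos hc]
      rw [ih _ hlt (j + 1) rfl (d + 1), ih _ hlt (j + 1) rfl (1 + 1)]
      ring
    · conv_lhs => rw [countDownFrom]
      conv_rhs => rw [countDownFrom]
      rw [dif_neg hc, dif_neg hc]
      ring

-- the runs recurrence, via getD
lemma pvRunsAux_getD_succ (perf : List Int) : ∀ (st : Option (Int × Int)) (i : Nat),
    i + 1 < perf.length →
    (pvRunsAux st perf).getD (i + 1) 0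
      = if perf.getD i 0 < perf.getD (i + 1) 0 then (pvRunsAux st perf).getD i 0 + 1 else 1 := by
  induction perf with
  | nil => intro st i h; simp at h
  | cons p rest ih =>
    intro st i h
    match i with
    | 0 =>
      match rest with
      | [] => simp at h
      | q :: rest' =>
        simp only [pvRunsAux, List.getD_cons_succ, List.getD_cons_zero]
        rfl
    | i + 1 =>
      have h' : i + 1 < rest.length := by simpa using h
      simp only [pvRunsAux, List.getD_cons_succ]
      exact ih (some (p, pvVal st p)) i h'

lemma pvUp_eq (perf : List Int) : ∀ (i : Nat), i < perf.length →
    countUpFrom perf 1 i = (pvRuns perf).getD i 0 := by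
  intro i
  induction i with
  | zero =>
    intro h
    match perf, h with
    | p :: rest, _ => rfl
  | succ i ih =>
    intro h
    simp only [pvRuns] at ih ⊢
    rw [pvRunsAux_getD_succ perf none i h]
    simp only [countUpFrom]
    split
    · rw [pvCU_acc perf i (1 + 1), ih (by omega)]
      show 1 + 1 - 1 + (pvRunsAux none perf).getD i 0 = (pvRunsAux none perf).getD i 0 + 1
      ring
    · rfl

-- shift and head lemmas for countDownFrom / pvDwn
lemma pvCD_shift (p : Int) (perf : List Int) : ∀ (j : Nat) (d : Int),
    countDownFrom (p :: perf) d (j + 1) = countDownFrom perf d j := by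
  intro j
  induction hn : perf.length - j using Nat.strong_induction_on generalizing j with
  | _ n ih =>
    intro d
    have hc : ((j + 1) + 1 < (p :: perf).length ∧ (p :: perf).getD (j + 1 + 1) 0 < (p :: perf).getD (j + 1) 0)
        ↔ (j + 1 < perf.length ∧ perf.getD (j + 1) 0 < perf.getD j 0) := by
      simp [List.length_cons]
    by_cases h2 : j + 1 < perf.length ∧ perf.getD (j + 1) 0 < perf.getD j 0
    · conv_lhs => rw [countDownFrom]
      conv_rhs => rw [countDownFrom]
      rw [dif_pos (hc.2 h2), dif_pos h2]
      have hlt : perf.length - (j + 1) < n := by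
        have := h2.1; omega
      exact ih _ hlt (j + 1) rfl (d + 1)
    · conv_lhs => rw [countDownFrom]
      conv_rhs => rw [countDownFrom]
      rw [dif_neg (fun hh => h2 (hc.1 hh)), dif_neg h2]

lemma pvDwn_getD_succ (p : Int) (rest : List Int) (i : Nat) (h : i < rest.length) :
    (pvDwn (p :: rest)).getD (i + 1) 0 = (pvDwn rest).getD i 0 := by
  match rest, h with
  | q :: rest', _ => simp [pvDwn]

lemma pvDn_eq (perf : List Int) : ∀ (i : Nat), i < perf.length →
    countDownFrom perf 1 i = (pvDwn perf).getD i 0 := by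
  induction perf with
  | nil => intro i h; simp at h
  | cons p rest ih =>
    intro i h
    match i with
    | 0 =>
      match rest with
      | [] =>
        rw [countDownFrom]
        rw [dif_neg (by simp)]
        rfl
      | q :: rest' =>
        rw [countDownFrom]
        obtain ⟨dh, t, hD, _⟩ := pvDwn_cons q rest'
        by_cases hqp : q < p
        · rw [dif_pos (by simp [hqp])]
          rw [pvCD_shift p (q :: rest') 0 (1 + 1)]
          rw [pvCD_acc (q :: rest') 0 (1 + 1)]
          rw [ih 0 (by simp)]
          show 1 + 1 - 1 + (pvDwn (q :: rest')).getD 0 0 = (pvDwn (p :: q :: rest')).getD 0 0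
          rw [show pvDwn (p :: q :: rest')
                = (if q < p then (pvDwn (q :: rest')).headD 1 + 1 else 1) :: pvDwn (q :: rest') from rfl]
          rw [hD]
          simp [hqp]
          ring
        · rw [dif_neg (by simp [hqp])]
          rw [show pvDwn (p :: q :: rest')
                = (if q < p then (pvDwn (q :: rest')).headD 1 + 1 else 1) :: pvDwn (q :: rest') from rfl]
          simp [hqp]
    | i + 1 =>
      have h' : i < rest.length := by simpa using h
      rw [pvCD_shift p rest i 1, pvDwn_getD_succ p rest i h']
      exact ih i h'

-- ===== VERDICT (by name: the statement is the Claim_ definition above) =====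
theorem get_bonuses_spec : Claim_equal_get_bonuses := by
  intro perf _
  show get_bonuses perf = get_bonuses_alt perf
  have hA : get_bonuses perf = List.zipWith max (pvRuns perf) (pvDwn perf) := by
    show (PySem.List.pyRange (((perf.length : Int)) - 2) (-1) (-1)).foldl (pvStep2 perf)
        ((PySem.List.pyRange 1 ((perf.length : Int)) 1).foldl (pvStep1 perf)
          (List.replicate perf.length (1 : Int)))
      = List.zipWith max (pvRuns perf) (pvDwn perf)
    rw [pvPass1_eq_runs]
    exact pvPass2_core perf none (fun q b h => by cases h)
  rw [hA]
  apply List.ext_getElem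
  · simp [pvRuns, pvRunsAux_length, pvDwn_length, get_bonuses_alt]
  · intro i h1 h2
    have hi : i < perf.length := by
      simpa [pvRuns, pvRunsAux_length, pvDwn_length] using h1
    have hiR : i < (pvRuns perf).length := by simpa [pvRuns, pvRunsAux_length] using hi
    have hiD : i < (pvDwn perf).length := by simpa [pvDwn_length] using hi
    rw [List.getElem_zipWith]
    simp only [get_bonuses_alt, List.getElem_map, List.getElem_range]
    rw [pvUp_eq perf i hi, pvDn_eq perf i hi]
    rw [List.getD_eq_getElem _ _ hiR, List.getD_eq_getElem _ _ hiD]
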